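-- pv_equiv track=rewrite | github.com/rlaehd12/problemss | swear_pb/swea_newbus.py | what_bus
-- ===== SOURCE A (Python) =====
-- def what_bus(bus):
--     my_bus = []
--     if bus[0] == 1:  # 일반
--         for i in range(bus[1],bus[2] + 1):
--             my_bus.append(i)
--         return my_bus
--     elif bus[0] == 2:  # 급행
--         for i in range(bus[1], bus[2] + 1, 2):
--             my_bus.append(i)
--         return my_bus
--
--     else:  # 광역 급행
--         if (bus[1] % 2) == 0:  # 짝수면
--             for i in range(bus[1], bus[2] + 1):
--                 if i % 4 == 0:
--                     my_bus.append(i)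
--             return my_bus
--
--         else:  # 홀수면
--             for i in range(bus[1], bus[2] + 1):
--                 if i % 3 == 0:
--                     my_bus.append(i)
--             my_bus = [item for item in my_bus if (item % 10) != 0]
--
--             return my_bus
--         pass
-- ===== SOURCE B (Python) =====
-- def what_bus(bus):
--     kind, lo, hi = bus[0], bus[1], bus[2]
--     if kind == 1:
--         return list(range(lo, hi + 1))
--     if kind == 2:
--         return list(range(lo, hi + 1, 2))
--     if lo % 2 == 0:
--         return list(range(lo + (-lo) % 4, hi + 1, 4))
--     return [i for i in range(lo + (-lo) % 3, hi + 1, 3) if i % 10 != 0]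
-- ===== Notes on version B (the rewrite author's own statement) =====
-- stated objective: alternative
-- what changed: Instead of scanning every integer in [bus[1],bus[2]] and testing divisibility, B computes the first qualifying multiple and generates only the emitted values with a stepped range (step 4 for even bus[1], step 3 plus the %10 filter for odd).
import Mathlib
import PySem

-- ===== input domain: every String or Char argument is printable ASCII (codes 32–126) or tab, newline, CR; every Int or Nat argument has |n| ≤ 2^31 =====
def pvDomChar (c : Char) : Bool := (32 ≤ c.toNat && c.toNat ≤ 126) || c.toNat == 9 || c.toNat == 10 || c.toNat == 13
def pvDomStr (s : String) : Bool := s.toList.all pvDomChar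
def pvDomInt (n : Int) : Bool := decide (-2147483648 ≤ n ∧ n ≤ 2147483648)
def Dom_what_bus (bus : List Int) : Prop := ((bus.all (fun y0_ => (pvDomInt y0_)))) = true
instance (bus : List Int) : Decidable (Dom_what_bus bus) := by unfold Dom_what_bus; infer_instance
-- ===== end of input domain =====

-- B generates only the emitted values via stepped ranges instead of scanning and testing every
-- integer in [bus[1], bus[2]]; same return value on every input where A returns.

-- ===== PORT A =====
def what_bus (bus : List Int) : List Int :=
  let b0 := PySem.List.pyGetD bus 0 0
  let b1 := PySem.List.pyGetD bus 1 0
  let b2 := PySem.List.pyGetD bus 2 0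
  if b0 == 1 then
    (PySem.List.pyRange b1 (b2 + 1) 1).foldl (fun acc i => acc ++ [i]) []
  else if b0 == 2 then
    (PySem.List.pyRange b1 (b2 + 1) 2).foldl (fun acc i => acc ++ [i]) []
  else if PySem.Int.mod b1 2 == 0 then
    (PySem.List.pyRange b1 (b2 + 1) 1).foldl
      (fun acc i => if PySem.Int.mod i 4 == 0 then acc ++ [i] else acc) []
  else
    ((PySem.List.pyRange b1 (b2 + 1) 1).foldl
      (fun acc i => if PySem.Int.mod i 3 == 0 then acc ++ [i] else acc) []).filter
      (fun item => PySem.Int.mod item 10 != 0)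

-- ===== PORT B =====
def what_bus_alt (bus : List Int) : List Int :=
  let kind := PySem.List.pyGetD bus 0 0
  let lo := PySem.List.pyGetD bus 1 0
  let hi := PySem.List.pyGetD bus 2 0
  if kind == 1 then
    PySem.List.pyRange lo (hi + 1) 1
  else if kind == 2 then
    PySem.List.pyRange lo (hi + 1) 2
  else if PySem.Int.mod lo 2 == 0 then
    PySem.List.pyRange (lo + PySem.Int.mod (-lo) 4) (hi + 1) 4
  else
    (PySem.List.pyRange (lo + PySem.Int.mod (-lo) 3) (hi + 1) 3).filter
      (fun i => PySem.Int.mod i 10 != 0)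

-- ===== PRECONDITION & SPEC =====
-- A indexes bus[0], bus[1], bus[2]; on shorter lists it raises IndexError.
def Pre_what_bus (bus : List Int) : Prop := 3 ≤ bus.length
instance (bus : List Int) : Decidable (Pre_what_bus bus) := by unfold Pre_what_bus; infer_instance
def pvWitness_what_bus : List Int := [3, 1, 20]

def Spec_what_bus (bus : List Int) (out : List Int) : Prop := out = what_bus_alt bus
instance (bus : List Int) (out : List Int) : Decidable (Spec_what_bus bus out) := by unfold Spec_what_bus; infer_instance

-- ===== CLAIM (what is proved, stated in full; the proofs are below) =====
def Claim_equal_what_bus : Prop := ∀ (bus : List Int), Dom_what_bus bus → Pre_what_bus bus → Spec_what_bus bus (what_bus bus)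

-- ===== LEMMAS AND PROOFS =====

-- the stepped range pyRange (a + (-a) % k) b k enumerates exactly the multiples of k in [a, b)
lemma filter_dvd_pyRange_eq_step (a b k : Int) (hk : 0 < k) :
    (PySem.List.pyRange a b 1).filter (fun i => PySem.Int.mod i k == 0)
      = PySem.List.pyRange (a + PySem.Int.mod (-a) k) b k := by
  have hmod : PySem.Int.mod (-a) k = (-a) % k := PySem.Int.mod_eq_emod_of_pos hk
  have hs_dvd : k ∣ (a + (-a) % k) := by
    refine ⟨-((-a) / k), ?_⟩
    have := Int.emod_add_ediv (-a) k
    linarith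
  have hs_lb : a ≤ a + (-a) % k := by
    have := Int.emod_nonneg (-a) (by omega : k ≠ 0); omega
  have hs_ub : a + (-a) % k < a + k := by
    have := Int.emod_lt_of_pos (-a) hk; omega
  -- both sides are strictly increasing, so it suffices to compare membership
  apply List.Perm.eq_of_pairwise (le := fun x y : Int => x < y)
  · intro x y _ _ h1 h2; omega
  · exact List.Pairwise.filter _ (PySem.List.pairwise_lt_pyRange_one _ _)
  · rw [PySem.List.pyRange_of_pos _ _ hk]
    refine List.pairwise_lt_range.map _ ?_
    intro x y hxy
    have hxy' : (x : Int) < y := by exact_mod_cast hxy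
    nlinarith
  · rw [List.perm_ext_iff_of_nodup]
    · intro x
      simp only [List.mem_filter, PySem.List.mem_pyRange_one,
        PySem.List.mem_pyRange_iff_of_pos hk, beq_iff_eq,
        PySem.Int.mod_eq_zero_iff_dvd]
      constructor
      · rintro ⟨⟨hax, hxb⟩, hdvd⟩
        refine ⟨?_, hxb, (Int.dvd_sub hdvd (hmod ▸ hs_dvd))⟩
        by_contra hlt
        push_neg at hlt
        rw [hmod] at hlt
        have : k ≤ (a + (-a) % k) - x := Int.le_of_dvd (by omega) (Int.dvd_sub hs_dvd hdvd)
        omega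
      · rintro ⟨hsx, hxb, hdvd⟩
        rw [hmod] at hsx
        have hkx : k ∣ x := by
          have := Int.dvd_add hdvd (hmod ▸ hs_dvd)
          simpa using this
        exact ⟨⟨by omega, hxb⟩, hkx⟩
    · exact List.Nodup.filter _ (PySem.List.nodup_pyRange_one _ _)
    · rw [PySem.List.pyRange_of_pos _ _ hk]
      refine (List.nodup_range).map ?_
      intro x y hxy
      have h2 : k * (x : Int) = k * y := by linarith
      have := mul_left_cancel₀ (by omega : (k : Int) ≠ 0) h2
      exact_mod_cast this

-- ===== VERDICT (by name: the statement is the Claim_ definition above) =====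
theorem what_bus_spec : Claim_equal_what_bus := by
  intro bus _ _
  unfold Spec_what_bus what_bus what_bus_alt
  simp only [PySem.List.foldl_append_singleton_eq_self, PySem.List.foldl_append_if_eq_filter,
    List.nil_append]
  split_ifs
  · rfl
  · rfl
  · exact filter_dvd_pyRange_eq_step _ _ 4 (by norm_num)
  · rw [filter_dvd_pyRange_eq_step _ _ 3 (by norm_num)]
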